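-- pv_equiv track=rewrite | github.com/ai-kmu/etc | algorithm/2020/0414/yun_hyeok.py | solution
-- ===== SOURCE A (Python) =====
-- def solution(f, k):
--     if sum(f) <= k:
--       return -1
--     # 정렬된 food 리스트를 만든다.
--     food = sorted(f)
--
--     i = 0
--     k -= food[i] * (len(food) - i)
--     while k > 0 :
--         i += 1
--         k -= (food[i] - food[i-1]) * (len(food) - i)
--
--     # 임시로 저장해놓는다.
--     temp = food[i]
--     while k < 0:
--         temp -= 1
--         k += len(food) - i
--
--     # 원본 순서대로
--     answer = 0
--     for i, val in enumerate(f):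
--         if val > temp:
--             if k <= 0:
--               return i + 1
--             else:
--               k -= 1
--
--     return answer
-- ===== SOURCE B (Python) =====
-- def solution(f, k):
--     if sum(f) <= k:
--         return -1
--     n = len(f)
--
--     def eaten(t):
--         # total time spent if every food is eaten down to level t (or fully, if smaller)
--         return sum(min(x, t) for x in f)
--
--     # binary search the largest level temp with eaten(temp) <= k
--     lo = min(min(f), k // n)
--     hi = max(f)
--     while hi - lo > 1:
--         mid = (lo + hi) // 2
--         if eaten(mid) <= k:
--             lo = mid
--         else:
--             hi = mid
--     temp = lo
--     r = k - eaten(temp)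
--
--     for i, val in enumerate(f):
--         if val > temp:
--             if r <= 0:
--                 return i + 1
--             r -= 1
--     return 0
-- ===== Notes on version B (the rewrite author's own statement) =====
-- stated objective: alternative
-- what changed: Replaces A's sort-then-level-sweep plus a one-unit-at-a-time rollback loop by a binary search (over the food level) for the largest level temp with eaten(temp) <= k, computing eaten(t) = sum(min(x,t)) in one unsorted pass; only the final scan over the original order is shared.
-- outside the precondition, e.g. on solution([], -1): A raises IndexError, B raises ValueError
import Mathlib
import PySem

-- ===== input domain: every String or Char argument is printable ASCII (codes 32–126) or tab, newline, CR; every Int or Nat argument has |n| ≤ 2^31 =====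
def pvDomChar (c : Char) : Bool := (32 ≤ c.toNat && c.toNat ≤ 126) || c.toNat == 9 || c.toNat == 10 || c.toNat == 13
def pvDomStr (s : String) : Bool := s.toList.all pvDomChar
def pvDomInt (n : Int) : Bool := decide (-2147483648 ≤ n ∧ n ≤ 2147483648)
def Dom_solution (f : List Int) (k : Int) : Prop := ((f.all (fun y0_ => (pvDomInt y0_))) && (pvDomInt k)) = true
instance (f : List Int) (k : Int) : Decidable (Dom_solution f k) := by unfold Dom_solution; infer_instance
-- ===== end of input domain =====

-- B replaces A's sort + level sweep + unit-step rollback by a binary search for the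
-- threshold level; objective: alternative (different algorithm, similar cost).
-- Both Pythons raise on f = [] with k < 0 (A: IndexError, B: ValueError) — excluded by Pre_.

-- ===== PORT A =====
-- the final for-loop over enumerate(f) (this loop is textually identical in A and in B; shared helper)
def finalScan (temp : Int) : List Int → Int → Nat → Int
  | [], _, _ => 0
  | v :: rest, k, idx =>
      if temp < v then
        (if k ≤ 0 then (idx : Int) + 1 else finalScan temp rest (k - 1) (idx + 1))
      else finalScan temp rest k (idx + 1)

-- "while k > 0: i += 1; k -= (food[i] - food[i-1]) * (len(food) - i)"
-- (the 'i + 1 < length' conjunct only guards the index so the recursion is total; inside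
--  Pre_ the Python loop never reaches it)
def loopA (g : List Int) (i : Nat) (k : Int) : Nat × Int :=
  if 0 < k ∧ i + 1 < g.length then
    loopA g (i + 1)
      (k - (PySem.List.pyGetD g ((i : Int) + 1) 0 - PySem.List.pyGetD g (i : Int) 0) *
        ((g.length : Int) - ((i : Int) + 1)))
  else (i, k)
termination_by g.length - i

-- "while k < 0: temp -= 1; k += len(food) - i"   (0 < m guards totality; m ≥ 1 inside Pre_)
def rollA (temp k m : Int) : Int × Int :=
  if k < 0 ∧ 0 < m then rollA (temp - 1) (k + m) m else (temp, k)
termination_by (-k).toNat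
decreasing_by omega

def solution (f : List Int) (k : Int) : Int :=
  if f.sum ≤ k then -1
  else
    let g := PySem.List.sorted f (fun x => x) false
    let k1 := k - PySem.List.pyGetD g 0 0 * (g.length : Int)
    let p := loopA g 0 k1
    let temp := PySem.List.pyGetD g (p.1 : Int) 0
    let q := rollA temp p.2 ((g.length : Int) - (p.1 : Int))
    finalScan q.1 f q.2 0

-- ===== PORT B =====
-- eaten(t) = sum(min(x, t) for x in f)
def eatenB (f : List Int) (t : Int) : Int := (f.map (fun x => min x t)).sum

-- midpoint bounds, cited by bsB's termination proof
theorem bs_mid_bounds (lo hi : Int) (h : 1 < hi - lo) :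
    lo + 1 ≤ PySem.Int.floordiv (lo + hi) 2 ∧ PySem.Int.floordiv (lo + hi) 2 + 1 ≤ hi := by
  constructor
  · rw [PySem.Int.le_floordiv_iff_mul_le (by omega : (0:Int) < 2)]; omega
  · have := (PySem.Int.floordiv_lt_iff_lt_mul (a := lo + hi) (b := 2) (q := hi) (by omega)).mpr
      (by omega)
    omega

-- "while hi - lo > 1: mid = (lo+hi)//2; if eaten(mid) <= k: lo = mid else: hi = mid"
def bsB (f : List Int) (k lo hi : Int) : Int :=
  if h : 1 < hi - lo then
    if eatenB f (PySem.Int.floordiv (lo + hi) 2) ≤ k then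
      bsB f k (PySem.Int.floordiv (lo + hi) 2) hi
    else
      bsB f k lo (PySem.Int.floordiv (lo + hi) 2)
  else lo
termination_by (hi - lo).toNat
decreasing_by
  · have := bs_mid_bounds lo hi h; omega
  · have := bs_mid_bounds lo hi h; omega

def solution_alt (f : List Int) (k : Int) : Int :=
  if f.sum ≤ k then -1
  else
    match PySem.List.min? f (fun x => x), PySem.List.max? f (fun x => x) with
    | some mn, some mx =>
        let lo := min mn (PySem.Int.floordiv k (f.length : Int))
        let temp := bsB f k lo mx
        let r := k - eatenB f temp
        finalScan temp f r 0
    | _, _ => 0   -- unreachable: f = [] implies sum f = 0 ≤ k inside Pre_ (Python raises here)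

-- ===== PRECONDITION & SPEC =====
-- Pre_ excludes only f = [] with k < 0, where Python A raises IndexError (and B ValueError).
def Pre_solution (f : List Int) (k : Int) : Prop := ¬(f = [] ∧ k < 0)
instance (f : List Int) (k : Int) : Decidable (Pre_solution f k) := by
  unfold Pre_solution; infer_instance
def pvWitness_solution : List Int × Int := ([3, 1, 2], 4)

def Spec_solution (f : List Int) (k : Int) (out : Int) : Prop := out = solution_alt f k
instance (f : List Int) (k : Int) (out : Int) : Decidable (Spec_solution f k out) := by
  unfold Spec_solution; infer_instance

-- ===== CLAIM (what is proved, stated in full; the proofs are below) =====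
def Claim_equal_solution : Prop :=
  ∀ (f : List Int) (k : Int), Dom_solution f k → Pre_solution f k →
    Spec_solution f k (solution f k)

-- ===== LEMMAS AND PROOFS =====

theorem eaten_mono (f : List Int) {t u : Int} (h : t ≤ u) : eatenB f t ≤ eatenB f u := by
  induction f with
  | nil => simp [eatenB]
  | cons x xs ih =>
      simp only [eatenB, List.map_cons, List.sum_cons] at *
      have : min x t ≤ min x u := min_le_min le_rfl h
      omega

theorem eaten_of_forall_le (f : List Int) (t : Int) (h : ∀ x ∈ f, x ≤ t) :
    eatenB f t = f.sum := by
  induction f with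
  | nil => simp [eatenB]
  | cons x xs ih =>
      rw [List.forall_mem_cons] at h
      simp only [eatenB, List.map_cons, List.sum_cons] at *
      rw [min_eq_left h.1, ih h.2]

theorem eaten_of_forall_ge (f : List Int) (t : Int) (h : ∀ x ∈ f, t ≤ x) :
    eatenB f t = t * f.length := by
  induction f with
  | nil => simp [eatenB]
  | cons x xs ih =>
      rw [List.forall_mem_cons] at h
      simp only [eatenB, List.map_cons, List.sum_cons, List.length_cons] at *
      rw [min_eq_right h.1, ih h.2]; push_cast; ring

theorem eaten_append (t d : List Int) (T : Int) :
    eatenB (t ++ d) T = eatenB t T + eatenB d T := by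
  simp [eatenB]

theorem eaten_perm {g f : List Int} (h : g.Perm f) (t : Int) : eatenB g t = eatenB f t :=
  (h.map _).sum_eq

-- number of foods still above level T-1 (i.e. with x ≥ T)
def cntGe (f : List Int) (T : Int) : Int := ((f.filter (fun x => T ≤ x)).length : Int)

theorem cntGe_nonneg (f : List Int) (T : Int) : 0 ≤ cntGe f T := by
  simp [cntGe]

theorem eaten_succ (f : List Int) (t : Int) :
    eatenB f (t + 1) = eatenB f t + cntGe f (t + 1) := by
  induction f with
  | nil => simp [eatenB, cntGe]
  | cons x xs ih =>
      by_cases hx : t + 1 ≤ x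
      · simp only [eatenB, cntGe, List.map_cons, List.sum_cons, List.filter_cons] at *
        rw [if_pos (by simpa using hx)]
        have h1 : min x (t + 1) = t + 1 := min_eq_right hx
        have h2 : min x t = t := min_eq_right (by omega)
        simp only [List.length_cons]
        push_cast
        omega
      · simp only [eatenB, cntGe, List.map_cons, List.sum_cons, List.filter_cons] at *
        rw [if_neg (by simpa using hx)]
        have h1 : min x (t + 1) = x := min_eq_left (by omega)
        have h2 : min x t = x := min_eq_left (by omega)
        omega

theorem cntGe_all (d : List Int) (T : Int) (h : ∀ y ∈ d, T ≤ y) :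
    cntGe d T = d.length := by
  simp only [cntGe]
  rw [List.filter_eq_self.mpr (by intro y hy; simpa using h y hy)]

theorem cntGe_append (t d : List Int) (T : Int) :
    cntGe (t ++ d) T = cntGe t T + cntGe d T := by
  simp [cntGe, List.filter_append]

theorem cntGe_pos_of_mem {f : List Int} {T x : Int} (hx : x ∈ f) (hT : T ≤ x) :
    1 ≤ cntGe f T := by
  have : x ∈ f.filter (fun x => T ≤ x) := List.mem_filter.mpr ⟨hx, by simpa using hT⟩
  have := List.length_pos_of_mem this
  simp only [cntGe]; omega

-- the unique level characterisation
theorem char_unique (f : List Int) (k t1 t2 : Int)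
    (h1 : eatenB f t1 ≤ k ∧ k < eatenB f (t1 + 1))
    (h2 : eatenB f t2 ≤ k ∧ k < eatenB f (t2 + 1)) : t1 = t2 := by
  rcases lt_trichotomy t1 t2 with h | h | h
  · have := eaten_mono f (show t1 + 1 ≤ t2 by omega)
    omega
  · exact h
  · have := eaten_mono f (show t2 + 1 ≤ t1 by omega)
    omega

-- binary-search invariant
theorem bsB_spec (f : List Int) (k : Int) :
    ∀ (N : Nat) (lo hi : Int), (hi - lo).toNat ≤ N →
      eatenB f lo ≤ k → k < eatenB f hi →
      eatenB f (bsB f k lo hi) ≤ k ∧ k < eatenB f (bsB f k lo hi + 1) := by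
  intro N
  induction N with
  | zero =>
      intro lo hi hN hlo hhi
      have hle : hi ≤ lo := by omega
      have := eaten_mono f hle
      omega
  | succ N ih =>
      intro lo hi hN hlo hhi
      rw [bsB]
      by_cases h : 1 < hi - lo
      · simp only [h, dif_pos]
        have hm := bs_mid_bounds lo hi h
        by_cases hmid : eatenB f (PySem.Int.floordiv (lo + hi) 2) ≤ k
        · simp only [hmid, if_pos]
          exact ih _ hi (by omega) hmid hhi
        · simp only [hmid, if_neg, not_false_iff]
          exact ih lo _ (by omega) hlo (by omega)
      · simp only [h, dif_neg, not_false_iff]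
        have hlohi : lo < hi := by
          by_contra hc
          have := eaten_mono f (show hi ≤ lo by omega)
          omega
        have : hi ≤ lo + 1 := by omega
        have := eaten_mono f this
        exact ⟨hlo, by omega⟩

-- ------- A-side: the loop invariant -------

-- value of A's running k at index i (with g sorted)
def kinv (g : List Int) (k0 : Int) (i : Nat) : Int :=
  k0 - ((g.take i).sum + g.getD i 0 * ((g.length : Int) - (i : Int)))

theorem sum_take_succ (g : List Int) (i : Nat) (h : i < g.length) :
    (g.take (i + 1)).sum = (g.take i).sum + g[i] := by
  rw [List.take_add_one, List.getElem?_eq_getElem h]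
  rw [Option.toList_some, List.sum_append, List.sum_cons, List.sum_nil]
  ring

theorem kinv_step (g : List Int) (k0 : Int) (i : Nat) (h : i + 1 < g.length) :
    kinv g k0 (i + 1) =
      kinv g k0 i - (g.getD (i + 1) 0 - g.getD i 0) * ((g.length : Int) - ((i : Int) + 1)) := by
  unfold kinv
  rw [sum_take_succ g i (by omega)]
  rw [List.getD_eq_getElem g 0 (by omega : i < g.length),
      List.getD_eq_getElem g 0 (by omega : i + 1 < g.length)]
  push_cast
  ring

theorem pairwise_getElem {g : List Int} (hp : g.Pairwise (· ≤ ·)) {i j : Nat}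
    (hij : i ≤ j) (hj : j < g.length) : g[i]'(by omega) ≤ g[j] := by
  rcases Nat.eq_or_lt_of_le hij with rfl | hlt
  · exact le_rfl
  · exact List.pairwise_iff_getElem.mp hp i j (by omega) hj hlt

theorem kinv_last (g : List Int) (k0 : Int) (hne : g ≠ []) :
    kinv g k0 (g.length - 1) = k0 - g.sum := by
  have hlen : 0 < g.length := List.length_pos_iff.mpr hne
  unfold kinv
  have h1 : (g.take ((g.length - 1) + 1)).sum = (g.take (g.length - 1)).sum + g[g.length - 1] :=
    sum_take_succ g (g.length - 1) (by omega)
  have h2 : g.take ((g.length - 1) + 1) = g := by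
    rw [show g.length - 1 + 1 = g.length by omega]; exact List.take_length
  rw [h2] at h1
  rw [List.getD_eq_getElem g 0 (by omega : g.length - 1 < g.length)]
  have h3 : ((g.length : Int) - ((g.length - 1 : Nat) : Int)) = 1 := by
    have : ((g.length - 1 : Nat) : Int) = (g.length : Int) - 1 := by omega
    omega
  rw [h3]
  omega

theorem loopA_spec (g : List Int) (k0 : Int) (hp : g.Pairwise (· ≤ ·)) (hne : g ≠ [])
    (hlast : k0 - g.sum < 0) :
    ∀ (M : Nat) (i : Nat), g.length - i ≤ M → i < g.length → (i = 0 ∨ 0 < kinv g k0 (i - 1)) →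
      ∃ j, loopA g i (kinv g k0 i) = (j, kinv g k0 j) ∧ j < g.length ∧
        kinv g k0 j ≤ 0 ∧ (j = 0 ∨ 0 < kinv g k0 (j - 1)) := by
  intro M
  induction M with
  | zero => intro i hM hi _; omega
  | succ M ih =>
      intro i hM hi hprev
      rw [loopA]
      by_cases hk : 0 < kinv g k0 i
      · have hi1 : i + 1 < g.length := by
          rcases Nat.lt_or_ge (i + 1) g.length with h | h
          · exact h
          · have : i = g.length - 1 := by omega
            subst this
            rw [kinv_last g k0 hne] at hk
            omega
        simp only [hk, hi1, and_self, if_pos, true_and]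
        have harg :
            kinv g k0 i -
              (PySem.List.pyGetD g ((i : Int) + 1) 0 - PySem.List.pyGetD g (i : Int) 0) *
                ((g.length : Int) - ((i : Int) + 1)) = kinv g k0 (i + 1) := by
          have e1 : ((i : Int) + 1) = ((i + 1 : Nat) : Int) := by push_cast; ring
          rw [e1, PySem.List.pyGetD_natCast, PySem.List.pyGetD_natCast]
          rw [kinv_step g k0 i hi1]
          push_cast
          ring
        rw [harg]
        exact ih (i + 1) (by omega) hi1 (Or.inr (by simpa using hk))
      · simp only [hk, false_and, if_neg, not_false_iff]
        exact ⟨i, rfl, hi, by omega, hprev⟩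

theorem rollA_spec (m : Int) (hm : 0 < m) :
    ∀ (K : Nat) (temp k : Int), (-k).toNat ≤ K →
      ∃ t : Int, 0 ≤ t ∧ rollA temp k m = (temp - t, k + t * m) ∧ 0 ≤ k + t * m ∧
        (t = 0 ∨ k + t * m - m < 0) := by
  intro K
  induction K with
  | zero =>
      intro temp k hK
      have : ¬ k < 0 := by omega
      rw [rollA]
      simp only [this, false_and, if_neg, not_false_iff]
      exact ⟨0, le_rfl, by simp, by omega, Or.inl rfl⟩
  | succ K ih =>
      intro temp k hK
      by_cases hk : k < 0
      · rw [rollA]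
        simp only [hk, hm, and_self, if_pos, true_and]
        obtain ⟨t', ht0, heq, hge, hd⟩ := ih (temp - 1) (k + m) (by omega)
        refine ⟨t' + 1, by omega, ?_, by nlinarith, ?_⟩
        · rw [heq]
          simp only [Prod.mk.injEq]
          constructor <;> ring
        · right
          rcases hd with h | h
          · subst h; simpa using hk
          · nlinarith
      · rw [rollA]
        simp only [hk, false_and, if_neg, not_false_iff]
        exact ⟨0, le_rfl, by simp, by omega, Or.inl rfl⟩

-- sorted-list decomposition facts
theorem take_elems_le {g : List Int} (hp : g.Pairwise (· ≤ ·)) {j : Nat} (hj : j < g.length)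
    (hj0 : 0 < j) : ∀ x ∈ g.take j, x ≤ g[j - 1]'(by omega) := by
  intro x hx
  obtain ⟨p, hp1, hp2⟩ := List.getElem_of_mem hx
  have hplen : p < j := by
    have := List.length_take_le j g
    have h2 : p < (g.take j).length := hp1
    have h3 : (g.take j).length = min j g.length := List.length_take ..
    omega
  have : (g.take j)[p] = g[p]'(by omega) := List.getElem_take ..
  rw [this] at hp2
  rw [← hp2]
  exact pairwise_getElem hp (by omega) (by omega)

theorem drop_elems_ge {g : List Int} (hp : g.Pairwise (· ≤ ·)) {j : Nat} (hj : j < g.length) :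
    ∀ x ∈ g.drop j, g[j] ≤ x := by
  intro x hx
  obtain ⟨p, hp1, hp2⟩ := List.getElem_of_mem hx
  have h3 : (g.drop j).length = g.length - j := List.length_drop ..
  have : (g.drop j)[p] = g[j + p]'(by omega) := List.getElem_drop ..
  rw [this] at hp2
  rw [← hp2]
  exact pairwise_getElem hp (by omega) (by omega)

-- eaten at an interpolated level T between g[j-1] and g[j]
theorem eaten_interp (g : List Int) (T : Int) {j : Nat} (hj : j < g.length)
    (hp : g.Pairwise (· ≤ ·))
    (hlow : ∀ x ∈ g.take j, x ≤ T) (hT : T ≤ g[j]) :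
    eatenB g T = (g.take j).sum + T * ((g.length : Int) - (j : Int)) := by
  have hdecomp : g = g.take j ++ g.drop j := (List.take_append_drop j g).symm
  have hd : ∀ x ∈ g.drop j, T ≤ x := fun x hx => le_trans hT (drop_elems_ge hp hj x hx)
  calc eatenB g T = eatenB (g.take j ++ g.drop j) T := by rw [← hdecomp]
    _ = eatenB (g.take j) T + eatenB (g.drop j) T := eaten_append ..
    _ = (g.take j).sum + T * ((g.drop j).length : Int) := by
        rw [eaten_of_forall_le _ _ hlow, eaten_of_forall_ge _ _ hd]
    _ = (g.take j).sum + T * ((g.length : Int) - (j : Int)) := by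
        rw [List.length_drop]
        have : ((g.length - j : Nat) : Int) = (g.length : Int) - (j : Int) := by
          have : j ≤ g.length := by omega
          omega
        rw [this]

-- A's pipeline (from the sorted list) lands on the characterised pair
theorem solutionA_char (f : List Int) (k : Int) (hne : f ≠ []) (hsum : k < f.sum) :
    let g := PySem.List.sorted f (fun x => x) false
    let p := loopA g 0 (k - PySem.List.pyGetD g 0 0 * (g.length : Int))
    let q := rollA (PySem.List.pyGetD g (p.1 : Int) 0) p.2 ((g.length : Int) - (p.1 : Int))
    eatenB f q.1 ≤ k ∧ k < eatenB f (q.1 + 1) ∧ q.2 = k - eatenB f q.1 := by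
  intro g p q
  have hperm : g.Perm f := PySem.List.sorted_perm ..
  have hp : g.Pairwise (· ≤ ·) := by
    have := PySem.List.sorted_pairwise f (fun x => x)
    simpa using this
  have hgne : g ≠ [] := by
    intro h
    apply hne
    have hl := hperm.length_eq
    rw [h] at hl
    exact List.eq_nil_of_length_eq_zero hl.symm
  have hgsum : g.sum = f.sum := hperm.sum_eq
  have hlen : 0 < g.length := List.length_pos_iff.mpr hgne
  -- the initial k1 is kinv g k 0
  have hk1 : k - PySem.List.pyGetD g 0 0 * (g.length : Int) = kinv g k 0 := by
    unfold kinv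
    rw [show ((0:Nat) : Int) = (0:Int) by simp, PySem.List.pyGetD_zero]
    simp [List.getD]
  obtain ⟨j, hloop, hjlen, hjle, hjprev⟩ :=
    loopA_spec g k hp hgne (by omega) g.length 0 (by omega) (by omega) (Or.inl rfl)
  have hpdef : p = (j, kinv g k j) := by
    show loopA g 0 (k - PySem.List.pyGetD g 0 0 * (g.length : Int)) = _
    rw [hk1]; exact hloop
  have hm : (0 : Int) < (g.length : Int) - ((j : Nat) : Int) := by
    have : (j : Int) < (g.length : Int) := by exact_mod_cast hjlen
    omega
  obtain ⟨t, ht0, hroll, hge0, hdisj⟩ :=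
    rollA_spec ((g.length : Int) - (j : Int)) hm (-(kinv g k j)).toNat
      (PySem.List.pyGetD g ((j : Nat) : Int) 0) (kinv g k j) le_rfl
  have hgj : PySem.List.pyGetD g ((j : Nat) : Int) 0 = g[j] := by
    rw [PySem.List.pyGetD_natCast, List.getD_eq_getElem g 0 hjlen]
  set m : Int := (g.length : Int) - (j : Int) with hmdef
  have hqdef : q = (g[j] - t, kinv g k j + t * m) := by
    show rollA (PySem.List.pyGetD g ((p.1 : Nat) : Int) 0) p.2 ((g.length : Int) - (p.1 : Int)) = _
    rw [hpdef]
    simp only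
    rw [hgj] at hroll
    rw [hgj, ← hmdef]
    exact hroll
  -- abbreviations
  set T : Int := g[j] - t with hTdef
  have hkinvj : kinv g k j = k - ((g.take j).sum + g[j] * m) := by
    unfold kinv
    rw [List.getD_eq_getElem g 0 hjlen]
  -- T is at least g[j-1] (when j > 0): else the rollback would have stopped earlier
  have hlow : ∀ x ∈ g.take j, x ≤ T := by
    rcases Nat.eq_zero_or_pos j with hj0 | hj0
    · subst hj0; simp
    · intro x hx
      have hxle : x ≤ g[j - 1]'(by omega) := take_elems_le hp hjlen hj0 x hx
      have hprev : 0 < kinv g k (j - 1) := by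
        rcases hjprev with h | h
        · omega
        · exact h
      -- relate kinv (j-1) and kinv j
      have hstep : kinv g k j =
          kinv g k (j - 1) - (g[j] - g[j - 1]'(by omega)) * m := by
        have hs := kinv_step g k (j - 1) (by omega : (j - 1) + 1 < g.length)
        rw [show j - 1 + 1 = j by omega] at hs
        rw [hs, List.getD_eq_getElem g 0 hjlen,
            List.getD_eq_getElem g 0 (by omega : j - 1 < g.length)]
        have : ((j - 1 : Nat) : Int) + 1 = (j : Int) := by omega
        rw [this, ← hmdef]
      have hDelta : 0 ≤ g[j] - g[j - 1]'(by omega) :=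
        sub_nonneg.mpr (pairwise_getElem hp (by omega) hjlen)
      -- show g[j-1] ≤ T
      have hTge : g[j - 1]'(by omega) ≤ T := by
        by_contra hc
        push_neg at hc
        -- then t ≥ Δ + 1 with Δ = g[j] - g[j-1]
        have htbig : g[j] - g[j - 1]'(by omega) + 1 ≤ t := by omega
        have ht1 : t ≠ 0 := by omega
        rcases hdisj with h | h
        · exact ht1 h
        · -- kinv j + t*m - m < 0 but kinv j + t*m ≥ kinv (j-1) + m > m
          have : kinv g k j + t * m ≥ kinv g k (j - 1) + m := by
            rw [hstep]; nlinarith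
          omega
      omega
  have hTle : T ≤ g[j] := by omega
  have heatT : eatenB g T = (g.take j).sum + T * m := by
    have := eaten_interp g T hjlen hp hlow hTle
    rw [this, ← hmdef]
  have hq2 : q.2 = k - eatenB g T := by
    rw [hqdef]
    simp only
    rw [heatT, hkinvj]
    ring
  have hq1 : q.1 = T := by rw [hqdef]
  have hq2' : q.2 = kinv g k j + t * m := by rw [hqdef]
  have hq0 : 0 ≤ q.2 := by rw [hqdef]; simpa using hge0
  -- lower bound
  have hlb : eatenB g T ≤ k := by omega
  -- upper bound k < eatenB g (T + 1)
  have hub : k < eatenB g (T + 1) := by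
    have hsucc := eaten_succ g T
    by_cases hex : ∃ x ∈ g, T + 1 ≤ x
    · obtain ⟨x, hxg, hxT⟩ := hex
      have hcnt1 : 1 ≤ cntGe g (T + 1) := cntGe_pos_of_mem hxg hxT
      by_cases ht : t = 0
      · -- no rollback step: the running k is exactly 0 here
        have ht00 : t * m = 0 := by rw [ht]; ring
        have hqz : q.2 = 0 := by omega
        omega
      · -- at least one rollback step: q.2 < m and at least m foods lie above T
        have ht1 : 1 ≤ t := by omega
        have hrm : q.2 - m < 0 := by
          rcases hdisj with h | h
          · exact absurd h ht
          · omega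
        have hcntm : m ≤ cntGe g (T + 1) := by
          have hdecomp : g = g.take j ++ g.drop j := (List.take_append_drop j g).symm
          have hall : ∀ y ∈ g.drop j, T + 1 ≤ y := by
            intro y hy
            have := drop_elems_ge hp hjlen y hy
            omega
          have h1 : cntGe (g.drop j) (T + 1) = ((g.drop j).length : Int) :=
            cntGe_all _ _ hall
          have h2 : cntGe g (T + 1) = cntGe (g.take j) (T + 1) + cntGe (g.drop j) (T + 1) := by
            conv_lhs => rw [hdecomp]
            exact cntGe_append ..
          have h3 : 0 ≤ cntGe (g.take j) (T + 1) := cntGe_nonneg ..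
          rw [List.length_drop] at h1
          have h4 : ((g.length - j : Nat) : Int) = m := by
            rw [hmdef]; omega
          omega
        omega
    · push_neg at hex
      have : eatenB g (T + 1) = g.sum := eaten_of_forall_le _ _ (fun x hx => by
        have := hex x hx; omega)
      omega
  rw [hq1]
  rw [eaten_perm hperm] at hlb hub hq2
  exact ⟨hlb, hub, hq2⟩

-- B-side: initial bracket for the binary search
theorem solutionB_char (f : List Int) (k mn mx : Int) (hne : f ≠ []) (hsum : k < f.sum)
    (hmn : PySem.List.min? f (fun x => x) = some mn)
    (hmx : PySem.List.max? f (fun x => x) = some mx) :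
    let lo := min mn (PySem.Int.floordiv k (f.length : Int))
    let temp := bsB f k lo mx
    eatenB f temp ≤ k ∧ k < eatenB f (temp + 1) := by
  intro lo temp
  have hlen : 0 < f.length := List.length_pos_iff.mpr hne
  have hlenI : (0 : Int) < (f.length : Int) := by exact_mod_cast hlen
  have hmin : ∀ y ∈ f, mn ≤ y := by
    intro y hy
    simpa using PySem.List.min?_isMin hmn y hy
  have hmax : ∀ y ∈ f, y ≤ mx := by
    intro y hy
    simpa using PySem.List.max?_isMax hmx y hy
  have hlo_le : ∀ y ∈ f, lo ≤ y := fun y hy => le_trans (min_le_left ..) (hmin y hy)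
  have hlo : eatenB f lo ≤ k := by
    rw [eaten_of_forall_ge f lo hlo_le]
    have h1 : lo ≤ PySem.Int.floordiv k (f.length : Int) := min_le_right ..
    have h2 : PySem.Int.floordiv k (f.length : Int) * (f.length : Int) ≤ k := by
      rw [PySem.Int.floordiv_eq_ediv_of_pos hlenI]
      exact Int.ediv_mul_le k (by omega)
    nlinarith
  have hhi : k < eatenB f mx := by
    rw [eaten_of_forall_le f mx hmax]
    exact hsum
  exact bsB_spec f k (mx - lo).toNat lo mx le_rfl hlo hhi

-- ===== VERDICT (by name: the statement is the Claim_ definition above) =====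
theorem solution_spec : Claim_equal_solution := by
  intro f k _ hpre
  unfold Spec_solution solution solution_alt
  by_cases hs : f.sum ≤ k
  · simp [hs]
  · simp only [hs, if_neg, not_false_iff]
    push_neg at hs
    have hne : f ≠ [] := by
      intro h
      subst h
      simp at hs
      exact hpre ⟨rfl, by omega⟩
    obtain ⟨mn, hmn⟩ : ∃ mn, PySem.List.min? f (fun x => x) = some mn := by
      rcases hmno : PySem.List.min? f (fun x => x) with _ | mn
      · exact absurd ((PySem.List.«min?_eq_none_iff» f (fun x => x)).mp hmno) hne
      · exact ⟨mn, rfl⟩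
    obtain ⟨mx, hmx⟩ : ∃ mx, PySem.List.max? f (fun x => x) = some mx := by
      rcases hmxo : PySem.List.max? f (fun x => x) with _ | mx
      · exact absurd ((PySem.List.«max?_eq_none_iff» f (fun x => x)).mp hmxo) hne
      · exact ⟨mx, rfl⟩
    rw [hmn, hmx]
    have hA := solutionA_char f k hne hs
    have hB := solutionB_char f k mn mx hne hs hmn hmx
    simp only at hA hB
    set g := PySem.List.sorted f (fun x => x) false
    set p := loopA g 0 (k - PySem.List.pyGetD g 0 0 * (g.length : Int))
    set qA := rollA (PySem.List.pyGetD g (p.1 : Int) 0) p.2 ((g.length : Int) - (p.1 : Int))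
    set lo := min mn (PySem.Int.floordiv k (f.length : Int))
    set tB := bsB f k lo mx
    obtain ⟨hA1, hA2, hA3⟩ := hA
    obtain ⟨hB1, hB2⟩ := hB
    have hteq : qA.1 = tB := char_unique f k qA.1 tB ⟨hA1, hA2⟩ ⟨hB1, hB2⟩
    rw [hteq] at hA3 ⊢
    rw [hA3]
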